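-- pv_equiv track=rewrite | github.com/neuro-rights/PokerAxiom | src/strategy/board_analysis.py | _check_straight_possible
-- ===== SOURCE A (Python) =====
-- def _check_straight_possible(values: list[int]) -> bool:
--     """Check if a straight is possible with these card values."""
--     if len(values) < 4:
--         return False
--
--     # Add ace-low for wheel check
--     if 14 in values:
--         values = values + [1]
--
--     unique_values = sorted(set(values))
--
--     # Check for 4+ cards in a row or within span of 5
--     for i in range(len(unique_values) - 3):
--         window = unique_values[i : i + 4]
--         if window[-1] - window[0] <= 4:
--             return True
--
--     return False
-- ===== SOURCE B (Python) =====
-- def _check_straight_possible(values: list[int]) -> bool: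
--     """Check if a straight is possible with these card values."""
--     if len(values) < 4:
--         return False
--     present = set(values)
--     if 14 in present:
--         present.add(1)
--     # a straight draw exists iff some value s in hand starts a 5-wide
--     # interval containing at least 4 distinct present values
--     return any(sum(1 for d in range(5) if s + d in present) >= 4
--                for s in present)
-- ===== Notes on version B (the rewrite author's own statement) =====
-- stated objective: faster
-- what changed: Replaces sort-then-slide-a-window-over-the-sorted-uniques with a single set-membership scan: for each present value s it counts how many of s..s+4 are in the set and returns True when 4 are, so the sort and the window slicing disappear.
import Mathlib
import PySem

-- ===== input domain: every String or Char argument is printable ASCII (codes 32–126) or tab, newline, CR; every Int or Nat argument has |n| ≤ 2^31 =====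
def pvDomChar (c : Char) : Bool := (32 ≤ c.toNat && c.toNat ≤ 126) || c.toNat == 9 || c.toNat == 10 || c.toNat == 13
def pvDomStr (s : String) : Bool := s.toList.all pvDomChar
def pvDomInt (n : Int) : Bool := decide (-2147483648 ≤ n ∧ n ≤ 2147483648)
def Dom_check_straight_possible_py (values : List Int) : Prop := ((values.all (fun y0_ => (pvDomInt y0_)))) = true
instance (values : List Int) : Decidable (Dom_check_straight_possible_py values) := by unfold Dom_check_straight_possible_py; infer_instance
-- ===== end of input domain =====

-- B replaces A's sort-then-slide-a-window-over-sorted-uniques with a set-membership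
-- scan over the present values (alternative algorithm, same result on every input).


-- ===== PORT A =====
def check_straight_possible_py (values : List Int) : Bool :=
  if values.length < 4 then false
  else
    let values2 := if (14 : Int) ∈ values then values ++ [1] else values
    let unique_values := PySem.List.sorted (PySem.Set.ofList values2) (fun x => x) false
    (PySem.List.pyRange 0 ((unique_values.length : Int) - 3) 1).any (fun i =>
      let window := PySem.List.slice unique_values (some i) (some (i + 4))
      match PySem.List.pyGet? window (-1), PySem.List.pyGet? window 0 with
      | some last, some first => decide (last - first ≤ 4)
      | _, _ => false)

-- ===== PORT B =====
def check_straight_possible_py_alt (values : List Int) : Bool :=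
  if values.length < 4 then false
  else
    let present0 : PySem.Set Int := PySem.Set.ofList values
    let present := if PySem.Set.contains present0 14 then PySem.Set.add present0 1 else present0
    present.any (fun s =>
      decide (4 ≤ (PySem.List.pyRange 0 5 1).countP (fun d => present.contains (s + d))))

-- ===== PRECONDITION & SPEC =====
def Spec_check_straight_possible_py (values : List Int) (out : Bool) : Prop := out = check_straight_possible_py_alt values
instance (values : List Int) (out : Bool) : Decidable (Spec_check_straight_possible_py values out) := by unfold Spec_check_straight_possible_py; infer_instance

-- ===== CLAIM (what is proved, stated in full; the proofs are below) =====
def Claim_equal_check_straight_possible_py : Prop := ∀ (values : List Int), Dom_check_straight_possible_py values → Spec_check_straight_possible_py values (check_straight_possible_py values)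

-- ===== LEMMAS AND PROOFS =====
lemma pv_idx_strictMono (L : List Int) (hs : List.Pairwise (· < ·) L) {a b : Int}
    (ha : a ∈ L) (hb : b ∈ L) (hab : a < b) : L.idxOf a < L.idxOf b := by
  have hia := List.idxOf_lt_length_of_mem ha
  have hib := List.idxOf_lt_length_of_mem hb
  have hga := List.getElem_idxOf hia
  have hgb := List.getElem_idxOf hib
  by_contra h
  push_neg at h
  rcases lt_or_eq_of_le h with hlt | heq
  · have := List.pairwise_iff_getElem.mp hs _ _ hib hia hlt
    rw [hga, hgb] at this
    omega
  · simp only [heq] at hgb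
    rw [hga] at hgb
    omega

lemma pv_getElem_mono (L : List Int) (hs : List.Pairwise (· < ·) L) {i j : Nat}
    (hij : i ≤ j) (hj : j < L.length) : L[i]'(by omega) ≤ L[j] := by
  rcases lt_or_eq_of_le hij with hlt | heq
  · exact le_of_lt (List.pairwise_iff_getElem.mp hs _ _ (by omega) hj hlt)
  · subst heq; exact le_refl _

lemma pv_windowEval (L : List Int) (k : Nat) (hk : k + 3 < L.length) :
    PySem.List.slice L (some (k : Int)) (some ((k : Int) + 4)) =
      [L[k]'(by omega), L[k+1]'(by omega), L[k+2]'(by omega), L[k+3]'(by omega)] := by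
  rw [PySem.List.slice_toNat L (by positivity) (by positivity)]
  have h1 : ((k : Int)).toNat = k := by omega
  have h2 : ((k : Int) + 4).toNat = k + 4 := by omega
  rw [h1, h2]
  have ht : k + 4 - k = 4 := by omega
  rw [ht]
  apply List.ext_getElem
  · simp; omega
  · intro i hi1 hi2
    simp only [List.getElem_take, List.getElem_drop]
    have hi4 : i < 4 := by simpa using hi2
    interval_cases i <;> simp

-- 4 distinct hits force the count up to 4
lemma pv_countP_ge (l : List Int) (p : Int → Bool) (ds : List Int)
    (hnd : ds.Nodup) (hlen : ds.length = 4)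
    (hsub : ∀ x ∈ ds, x ∈ l ∧ p x = true) : 4 ≤ l.countP p := by
  rw [List.countP_eq_length_filter]
  have hsub' : ds ⊆ l.filter p := by
    intro x hx
    rw [List.mem_filter]
    exact hsub x hx
  have := (hnd.subperm hsub').length_le
  omega

lemma pv_get4 (a b c d : Int) :
    (match PySem.List.pyGet? [a,b,c,d] (-1), PySem.List.pyGet? [a,b,c,d] 0 with
     | some last, some first => decide (last - first ≤ 4)
     | _, _ => false) = decide (d - a ≤ 4) := by
  simp [PySem.List.pyGet?, PySem.List.pyIdx?]

lemma pv_straight_equiv (P L : List Int)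
    (hperm : ∀ x : Int, x ∈ L ↔ x ∈ P) (hs : List.Pairwise (· < ·) L) :
    ((PySem.List.pyRange 0 ((L.length : Int) - 3) 1).any (fun i =>
        let window := PySem.List.slice L (some i) (some (i + 4))
        match PySem.List.pyGet? window (-1), PySem.List.pyGet? window 0 with
        | some last, some first => decide (last - first ≤ 4)
        | _, _ => false))
      = P.any (fun s =>
          decide (4 ≤ (PySem.List.pyRange 0 5 1).countP (fun d => P.contains (s + d)))) := by
  have hmono := List.pairwise_iff_getElem.mp hs
  rw [Bool.eq_iff_iff]
  simp only [List.any_eq_true]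
  constructor
  · rintro ⟨i, hi, hbody⟩
    rw [PySem.List.mem_pyRange_one] at hi
    obtain ⟨hi0, hilt⟩ := hi
    have hik : i = (i.toNat : Int) := by omega
    set k := i.toNat with hkdef
    have hk : k + 3 < L.length := by omega
    rw [hik] at hbody
    simp only [pv_windowEval L k hk, pv_get4, decide_eq_true_eq] at hbody
    -- hbody : L[k+3] - L[k] ≤ 4
    refine ⟨L[k]'(by omega), (hperm _).mp (List.getElem_mem _), ?_⟩
    rw [decide_eq_true_eq]
    have h01 := hmono k (k+1) (by omega) (by omega) (by omega)
    have h12 := hmono (k+1) (k+2) (by omega) (by omega) (by omega)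
    have h23 := hmono (k+2) (k+3) (by omega) (by omega) (by omega)
    apply pv_countP_ge _ _ [0, L[k+1]'(by omega) - L[k]'(by omega),
      L[k+2]'(by omega) - L[k]'(by omega), L[k+3]'(by omega) - L[k]'(by omega)]
    · simp only [List.nodup_cons, List.mem_cons, List.nodup_nil, and_true,
        List.mem_nil_iff, or_false]
      constructor
      · push_neg; refine ⟨by omega, by omega, by omega⟩
      constructor
      · push_neg; refine ⟨by omega, by omega⟩
      constructor
      · push_neg; omega
      trivial
    · rfl
    · intro x hx
      have hmemL : ∀ (j : Nat) (hj : k + j < L.length),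
          (L[k]'(by omega) + (L[k+j]'hj - L[k]'(by omega))) ∈ P := by
        intro j hj
        have he : L[k]'(by omega) + (L[k+j]'hj - L[k]'(by omega)) = L[k+j]'hj := by omega
        rw [he]
        exact (hperm _).mp (List.getElem_mem _)
      simp only [List.mem_cons, List.not_mem_nil, or_false] at hx
      rcases hx with h | h | h | h
      · subst h
        refine ⟨by rw [PySem.List.mem_pyRange_one]; omega, ?_⟩
        rw [List.contains_iff_mem]
        have := hmemL 0 (by omega)
        simpa using this
      · subst h
        refine ⟨by rw [PySem.List.mem_pyRange_one]; omega, ?_⟩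
        rw [List.contains_iff_mem]
        exact hmemL 1 (by omega)
      · subst h
        refine ⟨by rw [PySem.List.mem_pyRange_one]; omega, ?_⟩
        rw [List.contains_iff_mem]
        exact hmemL 2 (by omega)
      · subst h
        refine ⟨by rw [PySem.List.mem_pyRange_one]; omega, ?_⟩
        rw [List.contains_iff_mem]
        exact hmemL 3 (by omega)
  · rintro ⟨s, hsP, hcnt⟩
    rw [decide_eq_true_eq] at hcnt
    rw [List.countP_eq_length_filter] at hcnt
    set F := (PySem.List.pyRange 0 5 1).filter (fun d => P.contains (s + d)) with hFdef
    have hFsort : List.Pairwise (· < ·) F := (PySem.List.pairwise_lt_pyRange_one 0 5).filter _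
    have hFmono := List.pairwise_iff_getElem.mp hFsort
    have hFelem : ∀ (j : Nat) (hj : j < F.length),
        (0 ≤ F[j]'hj ∧ F[j]'hj < 5) ∧ (s + F[j]'hj) ∈ L := by
      intro j hj
      have hall : ∀ x ∈ F, (0 ≤ x ∧ x < 5) ∧ (s + x) ∈ L := by
        intro x hx
        rw [hFdef, List.mem_filter] at hx
        obtain ⟨hrange, hp⟩ := hx
        rw [PySem.List.mem_pyRange_one] at hrange
        rw [List.contains_iff_mem] at hp
        exact ⟨hrange, (hperm _).mpr hp⟩
      exact hall _ (List.getElem_mem _)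
    have h0 : 0 < F.length := by omega
    have h3 : 3 < F.length := by omega
    -- indices in L of the four hit values
    have hidx : ∀ (p q : Nat) (hp : p < F.length) (hq : q < F.length), p < q →
        L.idxOf (s + F[p]'hp) < L.idxOf (s + F[q]'hq) := by
      intro p q hp hq hpq
      exact pv_idx_strictMono L hs ((hFelem p hp).2) ((hFelem q hq).2)
        (by have := hFmono p q hp hq hpq; omega)
    set i0 := L.idxOf (s + F[0]'h0) with hi0def
    set i3 := L.idxOf (s + F[3]'h3) with hi3def
    have hi03 : i0 < i3 := by
      have := hidx 0 3 h0 h3 (by omega)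
      calc i0 < L.idxOf (s + F[1]'(by omega)) := hidx 0 1 h0 (by omega) (by omega)
        _ < L.idxOf (s + F[2]'(by omega)) := hidx 1 2 (by omega) (by omega) (by omega)
        _ < i3 := hidx 2 3 (by omega) h3 (by omega)
    have hi3len : i3 < L.length := List.idxOf_lt_length_of_mem ((hFelem 3 h3).2)
    have hi1 : L.idxOf (s + F[1]'(by omega)) = L.idxOf (s + F[1]'(by omega)) := rfl
    have hchain : i0 + 3 ≤ i3 := by
      have a1 := hidx 0 1 h0 (by omega) (by omega)
      have a2 := hidx 1 2 (by omega) (by omega) (by omega)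
      have a3 := hidx 2 3 (by omega) h3 (by omega)
      omega
    have hk : i0 + 3 < L.length := by omega
    refine ⟨(i0 : Int), ?_, ?_⟩
    · rw [PySem.List.mem_pyRange_one]; constructor <;> [positivity; omega]
    · have hik : ((i0:Int)).toNat = i0 := by omega
      rw [show ((i0:Int)) = ((i0:Nat) : Int) from rfl]
      simp only [pv_windowEval L i0 hk, pv_get4, decide_eq_true_eq]
      have hg0 : L[i0]'(by omega) = s + F[0]'h0 := List.getElem_idxOf _
      have hg3 : L[i3]'hi3len = s + F[3]'h3 := List.getElem_idxOf _
      have hle : L[i0+3]'hk ≤ L[i3]'hi3len := pv_getElem_mono L hs hchain hi3len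
      have hb0 := (hFelem 0 h0).1
      have hb3 := (hFelem 3 h3).1
      omega

-- ===== VERDICT (by name: the statement is the Claim_ definition above) =====
theorem check_straight_possible_py_spec : Claim_equal_check_straight_possible_py := by
  intro values _
  unfold Spec_check_straight_possible_py
  simp only [check_straight_possible_py, check_straight_possible_py_alt]
  by_cases hlen : values.length < 4
  · simp [hlen]
  · simp only [if_neg hlen]
    have hof : (if PySem.Set.contains (PySem.Set.ofList values) 14
          then PySem.Set.add (PySem.Set.ofList values) 1 else PySem.Set.ofList values)
        = PySem.Set.ofList (if (14 : Int) ∈ values then values ++ [1] else values) := by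
      have hc : PySem.Set.contains (PySem.Set.ofList values) 14 = true ↔ (14 : Int) ∈ values := by
        show List.contains _ _ = true ↔ _
        rw [List.contains_iff_mem, PySem.Set.mem_ofList]
      by_cases h14 : (14 : Int) ∈ values
      · rw [if_pos h14, if_pos (hc.mpr h14)]
        rw [PySem.Set.ofList_eq_foldl, PySem.Set.ofList_eq_foldl, List.foldl_append]
        rfl
      · rw [if_neg h14, if_neg (fun h => h14 (hc.mp h))]
    rw [hof]
    exact pv_straight_equiv _ _
      (fun x => PySem.List.mem_sorted _ _ _ _)
      (PySem.List.sorted_ofList_pairwise_lt _)
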